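-- pv_equiv track=rewrite | github.com/foxwhite25/adventofcode | 2022/17/k.py | attempt_move
-- ===== SOURCE A (Python) =====
-- def attempt_move(move, rock_posns, situation):
-- 	new_posns = []
-- 	if move == "<":
-- 		for p in rock_posns:
-- 			if p[1] == 0 or situation[p[0]][p[1] - 1] != 0:
-- 				return rock_posns
-- 			new_posns.append((p[0], p[1] - 1))
-- 		return new_posns
-- 	elif move == ">":
-- 		for p in rock_posns:
-- 			if p[1] == 6 or situation[p[0]][p[1] + 1] != 0:
-- 				return rock_posns
-- 			new_posns.append((p[0], p[1] + 1))
-- 		return new_posns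
-- 	else:
-- 		assert False
-- ===== SOURCE B (Python) =====
-- def attempt_move(move, rock_posns, situation):
--     assert move in ("<", ">")
--     dx, wall = (-1, 0) if move == "<" else (1, 6)
--
--     def shifted(ps):
--         # recursively build the shifted list; None signals a collision
--         if not ps:
--             return []
--         r, c = ps[0]
--         if c == wall or situation[r][c + dx] != 0:
--             return None
--         tail = shifted(ps[1:])
--         return None if tail is None else [(r, c + dx)] + tail
--
--     res = shifted(rock_posns)
--     return rock_posns if res is None else res
-- ===== Notes on version B (the rewrite author's own statement) =====
-- stated objective: alternative
-- what changed: B replaces A's two duplicated imperative loops with early return by a single parameterized recursive helper in maybe-monad style: it returns None on the first collision and otherwise builds the shifted list by consing during the recursion; the caller falls back to the original list on None.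
import Mathlib
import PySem

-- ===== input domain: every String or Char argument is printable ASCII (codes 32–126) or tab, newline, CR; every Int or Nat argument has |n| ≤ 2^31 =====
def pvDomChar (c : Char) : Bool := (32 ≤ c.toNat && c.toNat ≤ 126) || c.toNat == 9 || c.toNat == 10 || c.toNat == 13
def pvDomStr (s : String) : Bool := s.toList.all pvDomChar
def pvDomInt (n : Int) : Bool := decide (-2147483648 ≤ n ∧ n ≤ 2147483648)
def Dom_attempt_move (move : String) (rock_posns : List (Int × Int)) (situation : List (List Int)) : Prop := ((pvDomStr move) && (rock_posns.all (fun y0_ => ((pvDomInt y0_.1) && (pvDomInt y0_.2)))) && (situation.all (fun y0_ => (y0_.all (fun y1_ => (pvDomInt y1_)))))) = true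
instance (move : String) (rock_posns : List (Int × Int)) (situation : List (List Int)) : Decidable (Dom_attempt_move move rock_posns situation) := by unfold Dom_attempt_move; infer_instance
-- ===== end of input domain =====

-- B recasts A's duplicated early-return loops as one parameterized recursive helper in maybe-monad style (None = collision); return value only.


-- ===== PORT A =====
-- A's "<" loop: appends shifted rocks, early-returns the original list on a collision.
def attemptMoveLoopL (orig : List (Int × Int)) (situation : List (List Int)) :
    List (Int × Int) → List (Int × Int) → List (Int × Int)
  | new_posns, [] => new_posns
  | new_posns, p :: rest =>
    if p.2 = 0 ∨ PySem.List.pyGetD (PySem.List.pyGetD situation p.1 []) (p.2 - 1) 0 ≠ 0 then orig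
    else attemptMoveLoopL orig situation (new_posns ++ [(p.1, p.2 - 1)]) rest

-- A's ">" loop.
def attemptMoveLoopR (orig : List (Int × Int)) (situation : List (List Int)) :
    List (Int × Int) → List (Int × Int) → List (Int × Int)
  | new_posns, [] => new_posns
  | new_posns, p :: rest =>
    if p.2 = 6 ∨ PySem.List.pyGetD (PySem.List.pyGetD situation p.1 []) (p.2 + 1) 0 ≠ 0 then orig
    else attemptMoveLoopR orig situation (new_posns ++ [(p.1, p.2 + 1)]) rest

def attempt_move (move : String) (rock_posns : List (Int × Int)) (situation : List (List Int)) : List (Int × Int) :=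
  if move = "<" then attemptMoveLoopL rock_posns situation [] rock_posns
  else if move = ">" then attemptMoveLoopR rock_posns situation [] rock_posns
  else []  -- Python: assert False raises; excluded by Pre_attempt_move

-- ===== PORT B =====
-- B's recursive helper 'shifted': none = collision, else the shifted list built by consing.
def shiftedRocks (dx wall : Int) (situation : List (List Int)) :
    List (Int × Int) → Option (List (Int × Int))
  | [] => some []
  | (r, c) :: rest =>
    if c == wall || PySem.List.pyGetD (PySem.List.pyGetD situation r []) (c + dx) 0 != 0 then none
    else (shiftedRocks dx wall situation rest).map (fun tail => (r, c + dx) :: tail)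

def attempt_move_alt (move : String) (rock_posns : List (Int × Int)) (situation : List (List Int)) : List (Int × Int) :=
  -- assert move in ("<", ">") raises otherwise; excluded by Pre_attempt_move
  let dx : Int := if move = "<" then -1 else 1
  let wall : Int := if move = "<" then 0 else 6
  match shiftedRocks dx wall situation rock_posns with
  | none => rock_posns
  | some res => res

-- ===== PRECONDITION & SPEC =====
-- A collision cell (wall or nonzero) stops the scan, so A raises exactly when some rock's index access is
-- out of range while every earlier rock was freely movable; Pre_ excludes exactly the raising inputs
-- (assert False for other moves, IndexError mid-scan).
def rockFree (move : String) (situation : List (List Int)) (p : Int × Int) : Bool :=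
  p.2 != (if move = "<" then 0 else 6) &&
  decide (PySem.Raise.InRange situation.length p.1) &&
  decide (PySem.Raise.InRange (PySem.List.pyGetD situation p.1 []).length (p.2 + (if move = "<" then -1 else 1))) &&
  PySem.List.pyGetD (PySem.List.pyGetD situation p.1 []) (p.2 + (if move = "<" then -1 else 1)) 0 == 0

def rockSafe (move : String) (situation : List (List Int)) (p : Int × Int) : Bool :=
  p.2 == (if move = "<" then 0 else 6) ||
  (decide (PySem.Raise.InRange situation.length p.1) &&
   decide (PySem.Raise.InRange (PySem.List.pyGetD situation p.1 []).length (p.2 + (if move = "<" then -1 else 1))))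

def Pre_attempt_move (move : String) (rock_posns : List (Int × Int)) (situation : List (List Int)) : Prop :=
  (move = "<" ∨ move = ">") ∧
  ∀ i < rock_posns.length,
    (∀ j < i, rockFree move situation (rock_posns.getD j (0, 0)) = true) →
    rockSafe move situation (rock_posns.getD i (0, 0)) = true
instance (move : String) (rock_posns : List (Int × Int)) (situation : List (List Int)) : Decidable (Pre_attempt_move move rock_posns situation) := by unfold Pre_attempt_move; infer_instance

def pvWitness_attempt_move : String × (List (Int × Int)) × List (List Int) :=
  ("<", [(0, 3), (0, 4)], [[0, 0, 0, 0, 0, 0, 0]])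

def Spec_attempt_move (move : String) (rock_posns : List (Int × Int)) (situation : List (List Int)) (out : List (Int × Int)) : Prop := out = attempt_move_alt move rock_posns situation
instance (move : String) (rock_posns : List (Int × Int)) (situation : List (List Int)) (out : List (Int × Int)) : Decidable (Spec_attempt_move move rock_posns situation out) := by unfold Spec_attempt_move; infer_instance

-- ===== CLAIM (what is proved, stated in full; the proofs are below) =====
def Claim_equal_attempt_move : Prop := ∀ (move : String) (rock_posns : List (Int × Int)) (situation : List (List Int)), Dom_attempt_move move rock_posns situation → Pre_attempt_move move rock_posns situation → Spec_attempt_move move rock_posns situation (attempt_move move rock_posns situation)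

-- ===== LEMMAS AND PROOFS =====
-- A's loop, characterized: original on any collision, else accumulator ++ the shifted rocks.
theorem loopL_eq (situation : List (List Int)) (orig : List (Int × Int)) :
    ∀ (rest acc : List (Int × Int)),
      attemptMoveLoopL orig situation acc rest =
        if rest.any (fun p => p.2 == (0 : Int) ||
            PySem.List.pyGetD (PySem.List.pyGetD situation p.1 []) (p.2 + (-1)) 0 != 0)
        then orig else acc ++ rest.map (fun p => (p.1, p.2 + (-1))) := by
  intro rest
  induction rest with
  | nil => intro acc; simp [attemptMoveLoopL]
  | cons p rest ih =>
    intro acc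
    rw [attemptMoveLoopL, List.any_cons, List.map_cons]
    by_cases h : p.2 = 0 ∨ PySem.List.pyGetD (PySem.List.pyGetD situation p.1 []) (p.2 - 1) 0 ≠ 0
    · have hb : (p.2 == (0 : Int) || PySem.List.pyGetD (PySem.List.pyGetD situation p.1 []) (p.2 + (-1)) 0 != 0) = true := by
        simpa [sub_eq_add_neg] using h
      rw [if_pos h, hb, Bool.true_or, if_pos rfl]
    · have hb : (p.2 == (0 : Int) || PySem.List.pyGetD (PySem.List.pyGetD situation p.1 []) (p.2 + (-1)) 0 != 0) = false := by
        simpa [sub_eq_add_neg] using h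
      rw [if_neg h, ih, hb, Bool.false_or]
      simp [sub_eq_add_neg]

theorem loopR_eq (situation : List (List Int)) (orig : List (Int × Int)) :
    ∀ (rest acc : List (Int × Int)),
      attemptMoveLoopR orig situation acc rest =
        if rest.any (fun p => p.2 == (6 : Int) ||
            PySem.List.pyGetD (PySem.List.pyGetD situation p.1 []) (p.2 + 1) 0 != 0)
        then orig else acc ++ rest.map (fun p => (p.1, p.2 + 1)) := by
  intro rest
  induction rest with
  | nil => intro acc; simp [attemptMoveLoopR]
  | cons p rest ih =>
    intro acc
    rw [attemptMoveLoopR, List.any_cons, List.map_cons]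
    by_cases h : p.2 = 6 ∨ PySem.List.pyGetD (PySem.List.pyGetD situation p.1 []) (p.2 + 1) 0 ≠ 0
    · have hb : (p.2 == (6 : Int) || PySem.List.pyGetD (PySem.List.pyGetD situation p.1 []) (p.2 + 1) 0 != 0) = true := by
        simpa using h
      rw [if_pos h, hb, Bool.true_or, if_pos rfl]
    · have hb : (p.2 == (6 : Int) || PySem.List.pyGetD (PySem.List.pyGetD situation p.1 []) (p.2 + 1) 0 != 0) = false := by
        simpa using h
      rw [if_neg h, ih, hb, Bool.false_or]
      simp

-- B's helper, characterized: none on any collision, else some of the shifted list.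
theorem shiftedRocks_eq (dx wall : Int) (situation : List (List Int)) :
    ∀ (ps : List (Int × Int)),
      shiftedRocks dx wall situation ps =
        if ps.any (fun p => p.2 == wall ||
            PySem.List.pyGetD (PySem.List.pyGetD situation p.1 []) (p.2 + dx) 0 != 0)
        then none else some (ps.map (fun p => (p.1, p.2 + dx))) := by
  intro ps
  induction ps with
  | nil => simp [shiftedRocks]
  | cons p rest ih =>
    obtain ⟨r, c⟩ := p
    rw [shiftedRocks, List.any_cons, List.map_cons, ih]
    by_cases h : (c == wall || PySem.List.pyGetD (PySem.List.pyGetD situation r []) (c + dx) 0 != 0) = true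
    · rw [if_pos h, h, Bool.true_or, if_pos rfl]
    · rw [if_neg h, Bool.eq_false_iff.mpr h, Bool.false_or]
      split_ifs <;> simp

-- ===== VERDICT (by name: the statement is the Claim_ definition above) =====
theorem attempt_move_spec : Claim_equal_attempt_move := by
  intro move rock_posns situation _ hpre
  unfold Spec_attempt_move attempt_move attempt_move_alt
  rcases hpre.1 with h | h <;> subst h <;>
    simp only [reduceIte, shiftedRocks_eq, loopL_eq, loopR_eq] <;>
    split_ifs <;> simp_all
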